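-- pv_equiv track=rewrite | github.com/kalifasahar/ScholarHub | Backend/services/login_service_local.py | validate_BGU_student
-- ===== SOURCE A (Python) =====
-- def validate_BGU_student(email: str) -> bool:
--     gmail_suffix = "@gmail.com"
--     bgu_suffix = "bgu.ac.il"
--     # invalid_chars = set('!#$%&\'*+/=?^`{|}~')
--     semail = email.split("@")
--
--     return len(semail) == 2 and \
--         semail[1].endswith(bgu_suffix) and \
--             not any([char in set('!#$%&\'*+/=?^`{|}~') for char in semail[0]]) and \
--                 not semail[0] == "" and not " " in semail[0] and \
--                     not "/" in semail[0] and not "\\" in semail[0]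
-- ===== SOURCE B (Python) =====
-- _PATTERN = "bgu.ac.il"
-- _FORBIDDEN = "!#$%&'*+/=?^`{|}~ \\"
--
--
-- def _step(k, c):
--     # longest p such that _PATTERN[:p] is a suffix of _PATTERN[:k] + c
--     t = _PATTERN[:k] + c
--     p = min(len(t), len(_PATTERN))
--     while p > 0 and _PATTERN[:p] != t[len(t) - p:]:
--         p -= 1
--     return p
--
--
-- def validate_BGU_student(email: str) -> bool:
--     # single-pass finite-state machine (the DFA a regex engine would run):
--     # state 0 = start, 1 = inside local part,
--     # 2+k = inside domain with k characters of the required suffix matched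
--     state = 0
--     for c in email:
--         if state <= 1:
--             if c == '@':
--                 if state == 0:
--                     return False
--                 state = 2
--             elif c in _FORBIDDEN:
--                 return False
--             else:
--                 state = 1
--         elif c == '@':
--             return False
--         else:
--             state = 2 + _step(state - 2, c)
--     return state == 2 + len(_PATTERN)
-- ===== Notes on version B (the rewrite author's own statement) =====
-- stated objective: alternative
-- what changed: B replaces A's split('@')+staged membership/suffix checks with a single left-to-right pass of a finite-state machine (start/local/domain states, with a KMP-style step tracking how many characters of the required 'bgu.ac.il' suffix are currently matched), deciding acceptance from the final state.
import Mathlib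
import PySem

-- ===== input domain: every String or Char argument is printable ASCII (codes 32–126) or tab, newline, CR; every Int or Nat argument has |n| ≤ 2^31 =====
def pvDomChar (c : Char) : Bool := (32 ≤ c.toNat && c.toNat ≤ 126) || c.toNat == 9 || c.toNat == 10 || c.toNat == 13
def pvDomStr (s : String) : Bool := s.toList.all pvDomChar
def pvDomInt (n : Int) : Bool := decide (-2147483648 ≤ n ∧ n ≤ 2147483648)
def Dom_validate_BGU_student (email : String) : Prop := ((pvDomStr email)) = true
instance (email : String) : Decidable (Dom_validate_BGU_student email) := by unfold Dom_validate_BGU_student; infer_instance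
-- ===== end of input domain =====

-- B replaces A's split/staged checks with a single-pass finite-state machine (the DFA a regex engine would run); alternative decomposition, not claimed faster.

-- ===== PORT A =====
def validate_BGU_student (email : String) : Bool :=
  let _gmail_suffix := "@gmail.com"
  let bgu_suffix := "bgu.ac.il"
  let semail := (PySem.Str.split? email "@").getD []
  decide (semail.length = 2) &&
  (PySem.Str.endswith ((PySem.List.pyGet? semail 1).getD "") bgu_suffix &&
  (!(((PySem.List.pyGet? semail 0).getD "").toList.map
      (fun char => PySem.Set.contains (PySem.Set.ofList "!#$%&'*+/=?^`{|}~".toList) char)).any id &&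
  (!decide ((PySem.List.pyGet? semail 0).getD "" = "") &&
  (!PySem.Str.isIn " " ((PySem.List.pyGet? semail 0).getD "") &&
  (!PySem.Str.isIn "/" ((PySem.List.pyGet? semail 0).getD "") &&
   !PySem.Str.isIn "\\" ((PySem.List.pyGet? semail 0).getD ""))))))

-- ===== PORT B =====
def pvPat : List Char := "bgu.ac.il".toList
def pvForb : List Char := "!#$%&'*+/=?^`{|}~ \\".toList

-- the `while p > 0 and _PATTERN[:p] != t[len(t)-p:]: p -= 1` loop of Source B's _step
def pvStepGo (t : List Char) : Nat → Nat
  | 0 => 0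
  | p + 1 => if pvPat.take (p + 1) = t.drop (t.length - (p + 1)) then p + 1 else pvStepGo t p

-- Source B's _step: longest p with _PATTERN[:p] a suffix of _PATTERN[:k] + c
def pvStep (k : Nat) (c : Char) : Nat :=
  let t := pvPat.take k ++ [c]
  pvStepGo t (min t.length pvPat.length)

-- Source B's for-loop with early returns: state 0 start, 1 local part, 2+k domain (k suffix chars matched)
def pvRun : Nat → List Char → Bool
  | state, [] => state == 2 + pvPat.length
  | state, c :: rest =>
    if state ≤ 1 then
      if c = '@' then
        if state = 0 then false else pvRun 2 rest
      else if c ∈ pvForb then false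
      else pvRun 1 rest
    else if c = '@' then false
    else pvRun (2 + pvStep (state - 2) c) rest

def validate_BGU_student_alt (email : String) : Bool := pvRun 0 email.toList

-- ===== PRECONDITION & SPEC =====
def Spec_validate_BGU_student (email : String) (out : Bool) : Prop := out = validate_BGU_student_alt email
instance (email : String) (out : Bool) : Decidable (Spec_validate_BGU_student email out) := by unfold Spec_validate_BGU_student; infer_instance

-- ===== CLAIM (what is proved, stated in full; the proofs are below) =====
def Claim_equal_validate_BGU_student : Prop := ∀ (email : String), Dom_validate_BGU_student email → Spec_validate_BGU_student email (validate_BGU_student email)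

-- ===== LEMMAS AND PROOFS =====

-- the common characterization both ports are proved equivalent to
def pvP (l : List Char) : Prop :=
  ∃ x y, l = x ++ '@' :: y ∧ x ≠ [] ∧ (∀ c ∈ x, c ≠ '@' ∧ c ∉ pvForb) ∧ '@' ∉ y ∧ pvPat <:+ y

-- ---- A-side: reference splitter ----
def pvSplit : List Char → List Char → List (List Char)
  | cur, [] => [cur]
  | cur, c :: rest => if c = '@' then cur :: pvSplit [] rest else pvSplit (cur ++ [c]) rest

theorem go_eq : ∀ (fuel : Nat) (l cur : List Char) (acc : List (List Char)),
    l.length < fuel →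
    PySem.Chars.splitOn.go ['@'] fuel l cur acc = acc.reverse ++ pvSplit cur.reverse l := by
  intro fuel
  induction fuel with
  | zero => intro l cur acc h; omega
  | succ n ih =>
    intro l cur acc h
    cases l with
    | nil => simp [PySem.Chars.splitOn.go, pvSplit]
    | cons c rest =>
      rw [PySem.Chars.splitOn.go]
      by_cases hc : c = '@'
      · subst hc
        simp only [List.isPrefixOf, BEq.rfl, Bool.and_self, if_pos]
        show PySem.Chars.splitOn.go ['@'] n (List.drop 1 ('@' :: rest)) [] (cur.reverse :: acc) = _
        rw [List.drop_one, List.tail_cons,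
          ih rest [] ((cur.reverse) :: acc) (by simpa using Nat.lt_of_succ_lt_succ h)]
        simp [pvSplit]
      · have : (['@'].isPrefixOf (c :: rest)) = false := by
          simp [List.isPrefixOf]; exact fun hh => (hc hh.symm).elim
        simp only [this, Bool.false_eq_true, if_false]
        rw [ih rest (c :: cur) acc (by simpa using Nat.lt_of_succ_lt_succ h)]
        simp [pvSplit, hc]

theorem splitOn_eq (l : List Char) : PySem.Chars.splitOn l ['@'] = pvSplit [] l := by
  have := go_eq (l.length + 1) l [] [] (by omega)
  simpa [PySem.Chars.splitOn] using this

theorem pvSplit_no_at {y : List Char} (h : '@' ∉ y) : ∀ (cur : List Char),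
    pvSplit cur y = [cur ++ y] := by
  induction y with
  | nil => intro cur; simp [pvSplit]
  | cons c rest ih =>
    intro cur
    have hc : c ≠ '@' := fun hh => h (hh ▸ List.mem_cons_self ..)
    have hr : '@' ∉ rest := fun hh => h (List.mem_cons_of_mem _ hh)
    simp [pvSplit, hc, ih hr]

theorem pvSplit_split {x : List Char} (h : '@' ∉ x) : ∀ (cur y : List Char),
    pvSplit cur (x ++ '@' :: y) = (cur ++ x) :: pvSplit [] y := by
  induction x with
  | nil => intro cur y; simp [pvSplit]
  | cons c rest ih =>
    intro cur y
    have hc : c ≠ '@' := fun hh => h (hh ▸ List.mem_cons_self ..)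
    have hr : '@' ∉ rest := fun hh => h (List.mem_cons_of_mem _ hh)
    simp [pvSplit, hc, ih hr]

theorem pvSplit_len_ge {y : List Char} (h : '@' ∈ y) : ∀ (cur : List Char),
    2 ≤ (pvSplit cur y).length := by
  induction y with
  | nil => simp at h
  | cons c rest ih =>
    intro cur
    by_cases hc : c = '@'
    · subst hc
      have : pvSplit cur ('@' :: rest) = cur :: pvSplit [] rest := by simp [pvSplit]
      rw [this]
      cases rest with
      | nil => simp [pvSplit]
      | cons d t =>
        by_cases hd : '@' ∈ d :: t
        · have := ih hd []; simp only [List.length_cons]; omega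
        · rw [pvSplit_no_at hd]; simp
    · have hr : '@' ∈ rest := by
        rcases List.mem_cons.1 h with h1 | h1
        · exact absurd h1.symm hc
        · exact h1
      simp only [pvSplit, if_neg hc]
      exact ih hr _

theorem first_at {l : List Char} (h : '@' ∈ l) :
    ∃ x y, l = x ++ '@' :: y ∧ '@' ∉ x := by
  induction l with
  | nil => simp at h
  | cons c rest ih =>
    by_cases hc : c = '@'
    · exact ⟨[], rest, by simp [hc], by simp⟩
    · have hr : '@' ∈ rest := by
        rcases List.mem_cons.1 h with h1 | h1
        · exact absurd h1.symm hc
        · exact h1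
      obtain ⟨x, y, rfl, hx⟩ := ih hr
      exact ⟨c :: x, y, rfl, by simp [hx]; exact fun hh => hc hh.symm⟩

theorem at_uniq : ∀ (x x' y y' : List Char), '@' ∉ x → '@' ∉ x' →
    x ++ '@' :: y = x' ++ '@' :: y' → x = x' ∧ y = y' := by
  intro x
  induction x with
  | nil =>
    intro x' y y' _ hx' heq
    cases x' with
    | nil => simpa using heq
    | cons c t =>
      exfalso
      have hc : '@' = c := by
        have := congrArg List.head? heq
        simpa using this
      exact hx' (hc ▸ List.mem_cons_self ..)
  | cons c t ih =>
    intro x' y y' hx hx' heq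
    cases x' with
    | nil =>
      exfalso
      have hc : c = '@' := by simpa using (List.cons.injEq .. ▸ heq).1
      exact hx (hc ▸ List.mem_cons_self ..)
    | cons c' t' =>
      have h1 := (List.cons.injEq .. ▸ heq).1
      have h2 := (List.cons.injEq .. ▸ heq).2
      obtain ⟨he, hy⟩ := ih t' y y' (fun hh => hx (List.mem_cons_of_mem _ hh))
        (fun hh => hx' (List.mem_cons_of_mem _ hh)) h2
      exact ⟨by rw [h1, he], hy⟩

theorem inf_singleton (a : Char) (l : List Char) : [a] <:+: l ↔ a ∈ l := by
  constructor
  · intro h; exact List.singleton_sublist.1 h.sublist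
  · intro h
    obtain ⟨s, t, rfl⟩ := List.append_of_mem h
    exact ⟨s, t, by simp⟩

theorem isIn_singleton (a : Char) (l : List Char) :
    PySem.Chars.isIn [a] l = decide (a ∈ l) := by
  by_cases h : a ∈ l
  · simp [h]
    exact (PySem.Chars.isIn_iff_infix _ _).2 ((inf_singleton a l).2 h)
  · simp [h]
    exact (PySem.Chars.isIn_eq_false_iff _ _).2 (fun hh => h ((inf_singleton a l).1 hh))

theorem sub_bad : ∀ c ∈ "!#$%&'*+/=?^`{|}~".toList, c ∈ pvForb := by
  have h : ("!#$%&'*+/=?^`{|}~".toList.all (fun c => decide (c ∈ pvForb))) = true := by decide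
  intro c hc
  exact of_decide_eq_true (List.all_eq_true.1 h c hc)

theorem bad_cases : ∀ c ∈ pvForb,
    c ∈ "!#$%&'*+/=?^`{|}~".toList ∨ c = ' ' ∨ c = '\\' := by
  have h : (pvForb.all
      (fun c => decide (c ∈ "!#$%&'*+/=?^`{|}~".toList ∨ c = ' ' ∨ c = '\\'))) = true := by decide
  intro c hc
  exact of_decide_eq_true (List.all_eq_true.1 h c hc)

theorem pyGet_zero {α : Type} (a : α) (r : List α) : PySem.List.pyGet? (a :: r) 0 = some a := by
  exact PySem.List.pyGet?_natCast (xs := (a :: r)) (n := 0)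

theorem pyGet_one {α : Type} (a b : α) (r : List α) : PySem.List.pyGet? (a :: b :: r) 1 = some b := by
  have h := PySem.List.pyGet?_natCast (xs := (a :: b :: r)) (n := 1)
  rw [show ((1:Nat) : Int) = 1 from rfl] at h
  rw [h]
  rfl

theorem A_iff (email : String) : validate_BGU_student email = true ↔ pvP email.toList := by
  have hat : "@".toList = ['@'] := by decide
  have hsemail : (PySem.Str.split? email "@").getD [] = (pvSplit [] email.toList).map String.ofList := by
    simp [PySem.Str.split?, PySem.Chars.split?, hat, splitOn_eq]
  unfold validate_BGU_student
  simp only [hsemail]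
  by_cases hmem : '@' ∈ email.toList
  · obtain ⟨x, y, hl, hx⟩ := first_at hmem
    rw [hl, pvSplit_split hx]
    simp only [List.nil_append, List.map_cons]
    by_cases hy : '@' ∈ y
    · have hlen : ¬ (((String.ofList x :: (pvSplit [] y).map String.ofList)).length = 2) := by
        have := pvSplit_len_ge hy ([] : List Char)
        simp only [List.length_cons, List.length_map]
        omega
      constructor
      · intro hcontra
        exfalso
        simp only [Bool.and_eq_true, decide_eq_true_eq] at hcontra
        exact hlen hcontra.1
      · rintro ⟨x', y', heq, -, hok, hy', -⟩
        obtain ⟨-, rfl⟩ := at_uniq x x' y y' hx (fun hh => ((hok _ hh).1 rfl).elim) heq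
        exact absurd hy hy'
    · rw [pvSplit_no_at hy]
      simp only [List.map_cons, List.map_nil]
      constructor
      · intro h
        simp only [Bool.and_eq_true, decide_eq_true_eq, Bool.not_eq_true',
          pyGet_zero, pyGet_one, Option.getD_some, String.toList_ofList] at h
        obtain ⟨-, hend, hset, hne, hsp, hsl, hbs⟩ := h
        refine ⟨x, y, rfl, ?_, ?_, hy, ?_⟩
        · intro hxe; rw [hxe] at hne; simp at hne
        · intro c hc
          refine ⟨fun hh => hx (hh ▸ hc), fun hcf => ?_⟩
          rcases bad_cases c hcf with hS | rfl | rfl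
          · have : (List.map (fun char =>
                (PySem.Set.ofList "!#$%&'*+/=?^`{|}~".toList).contains char) x).any id = true := by
              refine List.any_eq_true.2 ⟨_, List.mem_map_of_mem hc, ?_⟩
              simp only [id]
              exact (PySem.Set.contains_iff _ _).2 ((PySem.Set.mem_ofList _ _).2 hS)
            rw [this] at hset; exact absurd hset (by simp)
          · rw [PySem.Str.isIn_eq] at hsp
            rw [show " ".toList = [' '] from by decide, isIn_singleton] at hsp
            simp only [String.toList_ofList] at hsp
            simp [hc] at hsp
          · rw [PySem.Str.isIn_eq] at hbs
            rw [show "\\".toList = ['\\'] from by decide, isIn_singleton] at hbs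
            simp only [String.toList_ofList] at hbs
            simp [hc] at hbs
        · rw [PySem.Str.endswith_eq] at hend
          simp only [String.toList_ofList, List.nil_append] at hend
          simpa [pvPat] using (PySem.Chars.endswith_iff _ _).1 hend
      · rintro ⟨x', y', heq, hxne, hok, hy', hsuf⟩
        have hx'no : '@' ∉ x' := fun hh => ((hok _ hh).1 rfl).elim
        obtain ⟨rfl, rfl⟩ := at_uniq x x' y y' hx hx'no heq
        simp only [Bool.and_eq_true, decide_eq_true_eq, Bool.not_eq_true',
          pyGet_zero, pyGet_one, Option.getD_some, String.toList_ofList]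
        have hforb : ∀ c ∈ x, c ∉ pvForb := fun c hc => (hok c hc).2
        refine ⟨rfl, ?_, ?_, ?_, ?_, ?_, ?_⟩
        · rw [PySem.Str.endswith_eq]
          simp only [String.toList_ofList]
          exact (PySem.Chars.endswith_iff _ _).2 (by simpa [pvPat] using hsuf)
        · rw [List.any_eq_false]
          intro b hb
          obtain ⟨c, hc, rfl⟩ := List.mem_map.1 hb
          simp only [id_eq]
          intro ht
          exact hforb c hc (sub_bad c ((PySem.Set.mem_ofList _ _).1 ((PySem.Set.contains_iff _ _).1 ht)))
        · simp [hxne]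
        · rw [PySem.Str.isIn_eq, show " ".toList = [' '] from by decide, isIn_singleton]
          simp only [String.toList_ofList]
          simp only [decide_eq_false_iff_not]
          exact fun hh => hforb ' ' hh (by decide)
        · rw [PySem.Str.isIn_eq, show "/".toList = ['/'] from by decide, isIn_singleton]
          simp only [String.toList_ofList]
          simp only [decide_eq_false_iff_not]
          exact fun hh => hforb '/' hh (by decide)
        · rw [PySem.Str.isIn_eq, show "\\".toList = ['\\'] from by decide, isIn_singleton]
          simp only [String.toList_ofList]
          simp only [decide_eq_false_iff_not]
          exact fun hh => hforb '\\' hh (by decide)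
  · rw [pvSplit_no_at hmem]
    simp only [List.map_cons, List.map_nil, List.nil_append, List.length_cons, List.length_nil]
    constructor
    · intro h
      exfalso
      simp only [Bool.and_eq_true, decide_eq_true_eq] at h
      omega
    · rintro ⟨x, y, heq, -, -, -, -⟩
      exfalso
      exact hmem (heq ▸ (by simp : '@' ∈ x ++ '@' :: y))


-- ---- B-side: longest suffix-of-m that is a prefix of the pattern ----
theorem pvPat_len : pvPat.length = 9 := by decide

def pvL : List Char → Nat → Nat
  | _, 0 => 0
  | m, p + 1 => if pvPat.take (p + 1) <:+ m then p + 1 else pvL m p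

def pvLmax (m : List Char) : Nat := pvL m 9

theorem pvL_le (m : List Char) (n : Nat) : pvL m n ≤ n := by
  induction n with
  | zero => simp [pvL]
  | succ p ih => simp only [pvL]; split
                 · exact Nat.le_refl _
                 · exact Nat.le_succ_of_le ih

theorem pvL_suffix (m : List Char) (n : Nat) : pvPat.take (pvL m n) <:+ m := by
  induction n with
  | zero => simp [pvL]
  | succ p ih =>
    simp only [pvL]; split
    · assumption
    · exact ih

theorem pvL_max {m : List Char} {p : Nat} (n : Nat) (hpn : p ≤ n)
    (h : pvPat.take p <:+ m) : p ≤ pvL m n := by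
  induction n with
  | zero => omega
  | succ q ih =>
    simp only [pvL]; split
    · omega
    · rename_i hcond
      rcases Nat.lt_or_ge p (q + 1) with hlt | hge
      · exact ih (by omega)
      · have hpq : p = q + 1 := by omega
        exact absurd (hpq ▸ h) hcond

theorem take_len {p : Nat} (hp : p ≤ 9) : (pvPat.take p).length = p := by
  rw [List.length_take, pvPat_len]; omega

theorem suffix_append_le {s a y : List Char} (h : s.length ≤ y.length) :
    s <:+ a ++ y ↔ s <:+ y := by
  constructor
  · intro hs
    have h1 : s = (a ++ y).drop (a.length + (y.length - s.length)) := by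
      rw [List.suffix_iff_eq_drop, List.length_append] at hs
      have he : a.length + y.length - s.length = a.length + (y.length - s.length) := by omega
      rwa [he] at hs
    rw [List.drop_append] at h1
    have h2 : a.drop (a.length + (y.length - s.length)) = [] := by
      apply List.drop_eq_nil_of_le
      omega
    have h3 : a.length + (y.length - s.length) - a.length = y.length - s.length := by omega
    rw [h2, h3, List.nil_append] at h1
    rw [List.suffix_iff_eq_drop]
    exact h1
  · intro hs
    exact hs.trans (List.suffix_append a y)

theorem suffix_of_suffix_le {s₁ s₂ m : List Char} (h1 : s₁ <:+ m) (h2 : s₂ <:+ m)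
    (hl : s₁.length ≤ s₂.length) : s₁ <:+ s₂ := by
  obtain ⟨t, rfl⟩ := h2
  exact (suffix_append_le hl).1 h1

theorem append_suffix_cancel {u m y : List Char} : (u ++ y) <:+ (m ++ y) ↔ u <:+ m := by
  constructor
  · rintro ⟨t, ht⟩
    rw [← List.append_assoc] at ht
    exact ⟨t, List.append_cancel_right ht⟩
  · rintro ⟨t, rfl⟩
    exact ⟨t, (List.append_assoc t u y).symm⟩

theorem pvH (m : List Char) {q : Nat} (hq : q ≤ 9) :
    pvPat.take q <:+ m ↔ pvPat.take q <:+ pvPat.take (pvLmax m) := by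
  constructor
  · intro h
    refine suffix_of_suffix_le h (pvL_suffix m 9) ?_
    rw [take_len hq, take_len (show pvLmax m ≤ 9 from pvL_le m 9)]
    exact pvL_max 9 hq h
  · intro h
    exact h.trans (pvL_suffix m 9)

theorem pvL_congr {m₁ m₂ : List Char}
    (h : ∀ p, p ≤ 9 → (pvPat.take p <:+ m₁ ↔ pvPat.take p <:+ m₂)) :
    pvLmax m₁ = pvLmax m₂ := by
  have : ∀ n, n ≤ 9 → pvL m₁ n = pvL m₂ n := by
    intro n
    induction n with
    | zero => intro _; rfl
    | succ q ih =>
      intro hn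
      simp only [pvL]
      rw [if_congr (h (q + 1) hn) rfl rfl, ih (by omega)]
  exact this 9 (by omega)

theorem u_eq_take {u y : List Char} {p : Nat} (hp : p ≤ 9) (hu : u ++ y = pvPat.take p) :
    u = pvPat.take (p - y.length) := by
  have hlen : u.length = p - y.length := by
    have := congrArg List.length hu
    rw [List.length_append, take_len hp] at this
    omega
  have h1 : (u ++ y).take u.length = u := List.take_left
  rw [hu] at h1
  rw [← h1, List.take_take, hlen]
  congr 1
  omega

theorem take_suffix_append {y : List Char} {p : Nat} (hp : p ≤ 9) (hy : y.length < p)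
    (a : List Char) :
    pvPat.take p <:+ a ++ y ↔ (y <:+ pvPat.take p ∧ pvPat.take (p - y.length) <:+ a) := by
  constructor
  · intro h
    have hys : y <:+ pvPat.take p := by
      obtain ⟨t, ht⟩ := h
      have : y <:+ t ++ pvPat.take p := by
        rw [ht]; exact List.suffix_append a y
      exact (suffix_append_le (by rw [take_len hp]; omega)).1 this
    obtain ⟨u, hu⟩ := hys
    have hut := u_eq_take hp hu
    rw [← hu] at h
    exact ⟨⟨u, hu⟩, hut ▸ append_suffix_cancel.1 h⟩
  · rintro ⟨hys, hua⟩
    obtain ⟨u, hu⟩ := hys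
    have hut := u_eq_take hp hu
    rw [← hu]
    exact append_suffix_cancel.2 (hut ▸ hua)

theorem pvG (m y : List Char) : pvLmax (m ++ y) = pvLmax (pvPat.take (pvLmax m) ++ y) := by
  apply pvL_congr
  intro p hp
  rcases Nat.lt_or_ge y.length p with hcase | hcase
  · rw [take_suffix_append hp hcase, take_suffix_append hp hcase]
    exact and_congr_right (fun _ => pvH m (by omega))
  · rw [suffix_append_le (by rw [take_len hp]; omega),
      suffix_append_le (by rw [take_len hp]; omega)]

theorem pvStepGo_eq_pvL (t : List Char) : ∀ n, n ≤ 9 → pvStepGo t n = pvL t n := by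
  intro n
  induction n with
  | zero => intro _; rfl
  | succ p ih =>
    intro hn
    simp only [pvStepGo, pvL]
    have hiff : (pvPat.take (p + 1) = t.drop (t.length - (p + 1))) ↔ pvPat.take (p + 1) <:+ t := by
      rw [List.suffix_iff_eq_drop, take_len hn]
    rw [if_congr hiff rfl rfl, ih (by omega)]

theorem pvL_skip (t : List Char) : ∀ n, t.length ≤ n → n ≤ 9 → pvL t n = pvL t t.length := by
  intro n
  induction n with
  | zero => intro h _; have : t.length = 0 := by omega
            rw [this]
  | succ q ih =>
    intro h1 h2
    rcases Nat.lt_or_ge t.length (q + 1) with hlt | hge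
    · have hcond : ¬ (pvPat.take (q + 1) <:+ t) := by
        intro hc
        have := hc.length_le
        rw [take_len h2] at this
        omega
      simp only [pvL, if_neg hcond]
      exact ih (by omega) (by omega)
    · have : t.length = q + 1 := by omega
      rw [this]

theorem pvStep_eq {k : Nat} (hk : k ≤ 9) (c : Char) :
    pvStep k c = pvLmax (pvPat.take k ++ [c]) := by
  have hstep : pvStep k c
      = pvStepGo (pvPat.take k ++ [c]) (min (pvPat.take k ++ [c]).length pvPat.length) := rfl
  have hlen : (pvPat.take k ++ [c]).length = k + 1 := by simp [take_len hk]
  rw [hstep, pvPat_len, hlen]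
  unfold pvLmax
  rcases Nat.lt_or_ge k 9 with hlt | hge
  · have hmin : min (k + 1) 9 = k + 1 := by omega
    rw [hmin, pvStepGo_eq_pvL _ _ (by omega),
      pvL_skip _ 9 (by omega) (by omega), hlen]
  · have hk9 : k = 9 := by omega
    subst hk9
    rw [show min (9 + 1) 9 = 9 from rfl, pvStepGo_eq_pvL _ _ (by omega)]

theorem pvL_take {k : Nat} (hk : k ≤ 9) : pvLmax (pvPat.take k) = k := by
  refine Nat.le_antisymm ?_ (pvL_max 9 hk (List.suffix_refl _))
  have h := (pvL_suffix (pvPat.take k) 9).length_le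
  rw [take_len (Nat.le_trans (pvL_le _ 9) (by omega)), take_len hk] at h
  exact h

theorem pvL_eq9_iff (y : List Char) : pvLmax y = 9 ↔ pvPat <:+ y := by
  have htake : pvPat.take 9 = pvPat := List.take_of_length_le (by rw [pvPat_len])
  constructor
  · intro h
    have := pvL_suffix y 9
    rwa [show pvL y 9 = pvLmax y from rfl, h, htake] at this
  · intro h
    exact Nat.le_antisymm (pvL_le y 9) (pvL_max 9 (by omega) (htake ▸ h))

theorem runD (y : List Char) : ∀ k, k ≤ 9 →
    (pvRun (2 + k) y = true ↔ ('@' ∉ y ∧ pvLmax (pvPat.take k ++ y) = 9)) := by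
  induction y with
  | nil =>
    intro k hk
    simp only [pvRun, List.append_nil, beq_iff_eq, pvPat_len, pvL_take hk]
    constructor
    · intro h; exact ⟨by simp, by omega⟩
    · rintro ⟨-, h⟩; omega
  | cons c y ih =>
    intro k hk
    simp only [pvRun]
    rw [if_neg (by omega)]
    by_cases hc : c = '@'
    · subst hc
      simp
    · rw [if_neg hc]
      have hks : 2 + k - 2 = k := by omega
      rw [hks, pvStep_eq hk]
      rw [ih _ (show pvLmax (pvPat.take k ++ [c]) ≤ 9 from pvL_le _ 9)]
      rw [← pvG (pvPat.take k ++ [c]) y]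
      have hasc : (pvPat.take k ++ [c]) ++ y = pvPat.take k ++ (c :: y) := by
        simp [List.append_assoc]
      rw [hasc]
      constructor
      · rintro ⟨h1, h2⟩
        refine ⟨?_, h2⟩
        intro hh
        rcases List.mem_cons.1 hh with hh1 | hh1
        · exact hc hh1.symm
        · exact h1 hh1
      · rintro ⟨h1, h2⟩
        exact ⟨fun hh => h1 (List.mem_cons_of_mem _ hh), h2⟩

theorem run2 (y : List Char) : pvRun 2 y = true ↔ ('@' ∉ y ∧ pvPat <:+ y) := by
  have := runD y 0 (by omega)
  rw [show (2 : Nat) = 2 + 0 from rfl]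
  rw [this, pvL_eq9_iff]
  simp

theorem runL (l : List Char) : pvRun 1 l = true ↔
    ∃ x y, l = x ++ '@' :: y ∧ (∀ c ∈ x, c ≠ '@' ∧ c ∉ pvForb) ∧ pvRun 2 y = true := by
  induction l with
  | nil =>
    constructor
    · intro h; exact absurd h (by decide)
    · rintro ⟨x, y, heq, -, -⟩
      exact absurd heq (by simp)
  | cons c l ih =>
    have hrw : pvRun 1 (c :: l)
        = if c = '@' then pvRun 2 l else if c ∈ pvForb then false else pvRun 1 l := by
      simp only [pvRun]
      rw [if_pos (by omega)]
      by_cases hc : c = '@' <;> simp [hc]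
    rw [hrw]
    by_cases hc : c = '@'
    · subst hc
      rw [if_pos rfl]
      constructor
      · intro h
        exact ⟨[], l, rfl, by simp, h⟩
      · rintro ⟨x, y, heq, hok, hr⟩
        cases x with
        | nil =>
          have hly : l = y := by simpa using heq
          rw [hly]; exact hr
        | cons d t =>
          have hd : '@' = d := (List.cons.injEq .. ▸ heq).1
          exact absurd hd.symm (hok d (List.mem_cons_self ..)).1
    · rw [if_neg hc]
      by_cases hcf : c ∈ pvForb
      · rw [if_pos hcf]
        constructor
        · intro h; exact absurd h (by simp)
        · rintro ⟨x, y, heq, hok, -⟩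
          cases x with
          | nil => exact absurd ((List.cons.injEq .. ▸ heq).1) hc
          | cons d t =>
            have hd : c = d := (List.cons.injEq .. ▸ heq).1
            exact absurd (hd ▸ hcf) (hok d (List.mem_cons_self ..)).2
      · rw [if_neg hcf, ih]
        constructor
        · rintro ⟨x, y, rfl, hok, hr⟩
          refine ⟨c :: x, y, rfl, ?_, hr⟩
          intro d hd
          rcases List.mem_cons.1 hd with rfl | hd'
          · exact ⟨hc, hcf⟩
          · exact hok d hd'
        · rintro ⟨x, y, heq, hok, hr⟩
          cases x with
          | nil => exact absurd ((List.cons.injEq .. ▸ heq).1) hc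
          | cons d t =>
            have hd : c = d := (List.cons.injEq .. ▸ heq).1
            refine ⟨t, y, (List.cons.injEq .. ▸ heq).2, ?_, hr⟩
            exact fun e he => hok e (List.mem_cons_of_mem _ he)

theorem B_iff (email : String) : validate_BGU_student_alt email = true ↔ pvP email.toList := by
  unfold validate_BGU_student_alt
  cases hl : email.toList with
  | nil =>
    constructor
    · intro h; exact absurd h (by decide)
    · rintro ⟨x, y, heq, -, -, -, -⟩
      exact absurd heq (by simp)
  | cons c l =>
    have hrw : pvRun 0 (c :: l)
        = if c = '@' then false else if c ∈ pvForb then false else pvRun 1 l := by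
      simp only [pvRun]
      rw [if_pos (by omega)]
      by_cases hc : c = '@' <;> simp [hc]
    rw [hrw]
    by_cases hc : c = '@'
    · subst hc
      rw [if_pos rfl]
      constructor
      · intro h; exact absurd h (by simp)
      · rintro ⟨x, y, heq, hxne, hok, -, -⟩
        cases x with
        | nil => exact absurd rfl hxne
        | cons d t =>
          have hd : '@' = d := (List.cons.injEq .. ▸ heq).1
          exact absurd hd.symm (hok d (List.mem_cons_self ..)).1
    · rw [if_neg hc]
      by_cases hcf : c ∈ pvForb
      · rw [if_pos hcf]
        constructor
        · intro h; exact absurd h (by simp)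
        · rintro ⟨x, y, heq, hxne, hok, -, -⟩
          cases x with
          | nil => exact absurd ((List.cons.injEq .. ▸ heq).1) hc
          | cons d t =>
            have hd : c = d := (List.cons.injEq .. ▸ heq).1
            exact absurd (hd ▸ hcf) (hok d (List.mem_cons_self ..)).2
      · rw [if_neg hcf, runL]
        constructor
        · rintro ⟨x, y, rfl, hok, hr⟩
          obtain ⟨hy, hsuf⟩ := (run2 y).1 hr
          refine ⟨c :: x, y, rfl, by simp, ?_, hy, hsuf⟩
          intro d hd
          rcases List.mem_cons.1 hd with rfl | hd'
          · exact ⟨hc, hcf⟩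
          · exact hok d hd'
        · rintro ⟨x, y, heq, hxne, hok, hy, hsuf⟩
          cases x with
          | nil => exact absurd ((List.cons.injEq .. ▸ heq).1) hc
          | cons d t =>
            refine ⟨t, y, (List.cons.injEq .. ▸ heq).2, ?_, (run2 y).2 ⟨hy, hsuf⟩⟩
            exact fun e he => hok e (List.mem_cons_of_mem _ he)

theorem main_eq (email : String) : validate_BGU_student email = validate_BGU_student_alt email := by
  have ha := A_iff email
  have hb := B_iff email
  cases hA : validate_BGU_student email <;> cases hB : validate_BGU_student_alt email <;> simp_all

-- ===== VERDICT (by name: the statement is the Claim_ definition above) =====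
theorem validate_BGU_student_spec : Claim_equal_validate_BGU_student := by
  intro email _
  unfold Spec_validate_BGU_student
  exact main_eq email
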